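-- pv_equiv track=rewrite | github.com/pypi-data/pypi-mirror-188 | packages/pyYAMB/pyYAMB-0.1a0-py3-none-any.whl/pyyamb/tetra-all.py | tetra_substr
-- ===== SOURCE A (Python) =====
-- def tetra_substr(seq):
-- 	i = 0
-- 	acgt = ['A','C','G','T']
-- 	tetras = [f"{a}{b}{c}{d}" for a in acgt for b in acgt for c in acgt for d in acgt]
-- 	l = len(seq)
-- 	d = {}
-- 	while i < l-3:
-- 		word = seq[i:i+4]
-- 		d[word] = d.get(word, 0) + 1
-- 		i+=1
--
-- 	return "\t".join([str(d.get(i,0)) for i in tetras])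
-- ===== SOURCE B (Python) =====
-- def tetra_substr(seq):
-- 	m = {'A': 0, 'C': 1, 'G': 2, 'T': 3}
-- 	counts = [0] * 256
-- 	code = 0
-- 	run = 0
-- 	for ch in seq:
-- 		v = m.get(ch)
-- 		if v is None:
-- 			run = 0
-- 		else:
-- 			code = (code * 4 + v) % 256
-- 			run = run + 1
-- 			if run >= 4:
-- 				counts[code] = counts[code] + 1
-- 	return "\t".join(str(x) for x in counts)
-- ===== Notes on version B (the rewrite author's own statement) =====
-- stated objective: faster
-- what changed: Replaces the slice-every-window-into-a-dict-then-look-up-256-keys approach by a single pass over the characters with a rolling base-4 code (mod 256), a run counter for consecutive ACGT characters, and a flat 256-slot count array.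
import Mathlib
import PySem

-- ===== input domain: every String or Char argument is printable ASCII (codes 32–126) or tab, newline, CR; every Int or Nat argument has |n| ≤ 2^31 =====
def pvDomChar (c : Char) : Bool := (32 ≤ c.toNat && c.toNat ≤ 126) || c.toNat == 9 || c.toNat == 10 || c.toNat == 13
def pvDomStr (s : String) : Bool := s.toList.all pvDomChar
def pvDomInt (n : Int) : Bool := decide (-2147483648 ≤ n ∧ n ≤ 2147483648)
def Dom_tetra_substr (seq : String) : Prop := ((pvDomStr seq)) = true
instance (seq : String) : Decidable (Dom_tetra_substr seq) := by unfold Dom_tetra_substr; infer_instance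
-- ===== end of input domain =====

-- B replaces the slice-each-window-into-a-dict-then-look-up-256-keys algorithm by a single
-- character pass with a rolling base-4 window code (mod 256), a valid-run counter and a flat
-- 256-slot count array (objective: faster — no per-window string slicing or dict hashing).

-- ===== PORT A =====
def tetra_substr (seq : String) : String :=
  let acgt : List String := ["A", "C", "G", "T"]
  let tetras : List String :=
    acgt.flatMap (fun a => acgt.flatMap (fun b => acgt.flatMap (fun c =>
      acgt.map (fun d => PySem.Str.join "" [a, b, c, d]))))
  let l : Int := PySem.Str.len seq
  let d : PySem.Dict String Int :=
    (PySem.List.pyRange 0 (l - 3) 1).foldl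
      (fun d i =>
        let word := PySem.Str.slice seq (some i) (some (i + 4))
        d.insert word (d.getD word 0 + 1))
      PySem.Dict.empty
  PySem.Str.join "\t" (tetras.map (fun i => PySem.Int.toStr (d.getD i 0)))

-- ===== PORT B =====
def tetra_substr_alt (seq : String) : String :=
  let m : PySem.Dict Char Int := PySem.Dict.ofList [('A', 0), ('C', 1), ('G', 2), ('T', 3)]
  let st : List Int × Int × Int :=
    seq.toList.foldl
      (fun (st : List Int × Int × Int) ch =>
        match m.get? ch with
        | none => (st.1, st.2.1, 0)
        | some v =>
          let code := PySem.Int.mod (st.2.1 * 4 + v) 256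
          let run := st.2.2 + 1
          if 4 ≤ run then
            (PySem.List.pySetD st.1 code (PySem.List.pyGetD st.1 code 0 + 1), code, run)
          else
            (st.1, code, run))
      (List.replicate 256 0, 0, 0)
  PySem.Str.join "\t" (st.1.map (fun x => PySem.Int.toStr x))

-- ===== PRECONDITION & SPEC =====
def Spec_tetra_substr (seq : String) (out : String) : Prop := out = tetra_substr_alt seq
instance (seq : String) (out : String) : Decidable (Spec_tetra_substr seq out) := by unfold Spec_tetra_substr; infer_instance

-- ===== CLAIM (what is proved, stated in full; the proofs are below) =====
def Claim_equal_tetra_substr : Prop := ∀ (seq : String), Dom_tetra_substr seq → Spec_tetra_substr seq (tetra_substr seq)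

-- ===== LEMMAS AND PROOFS =====

/-- digit value of a nucleotide character (B's dict `m` as a function). -/
def digC (c : Char) : Option Int :=
  if c = 'A' then some 0 else if c = 'C' then some 1 else
  if c = 'G' then some 2 else if c = 'T' then some 3 else none

/-- base-4 code of a 4-character all-ACGT window, `none` otherwise. -/
def enc? (w : List Char) : Option Int :=
  match w with
  | [a, b, c, d] =>
    match digC a, digC b, digC c, digC d with
    | some x, some y, some z, some u => some (64 * x + 16 * y + 4 * z + u)
    | _, _, _, _ => none
  | _ => none

def wopt (w : List Char) : List Int :=
  match enc? w with
  | some k => [k]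
  | none => []

/-- codes of all valid 4-windows of a character list, in order. -/
def vwc : List Char → List Int
  | [] => []
  | a :: rest => wopt (a :: rest.take 3) ++ vwc rest

/-- base-4 value of a (valid) prefix window of length ≤ 3. -/
def encB (p : List Char) : Int := p.foldl (fun a c => 4 * a + (digC c).getD 0) 0

def tchr (n : Nat) : Char := if n = 0 then 'A' else if n = 1 then 'C' else if n = 2 then 'G' else 'T'

def tetraChars (k : Nat) : List Char := [tchr (k / 64 % 4), tchr (k / 16 % 4), tchr (k / 4 % 4), tchr (k % 4)]

def tetraStr (k : Nat) : String := String.ofList (tetraChars k)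

/-- B's loop body, named for the proofs (definitionally the lambda in `tetra_substr_alt`). -/
def bstep (st : List Int × Int × Int) (ch : Char) : List Int × Int × Int :=
  match (PySem.Dict.ofList [('A', (0:Int)), ('C', 1), ('G', 2), ('T', 3)]).get? ch with
  | none => (st.1, st.2.1, 0)
  | some v =>
    let code := PySem.Int.mod (st.2.1 * 4 + v) 256
    let run := st.2.2 + 1
    if 4 ≤ run then
      (PySem.List.pySetD st.1 code (PySem.List.pyGetD st.1 code 0 + 1), code, run)
    else
      (st.1, code, run)

lemma balt_eq (seq : String) :
    tetra_substr_alt seq =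
      PySem.Str.join "\t" ((seq.toList.foldl bstep (List.replicate 256 0, 0, 0)).1.map
        (fun x => PySem.Int.toStr x)) := rfl

lemma mget (c : Char) :
    (PySem.Dict.ofList [('A', (0:Int)), ('C', 1), ('G', 2), ('T', 3)]).get? c = digC c := by
  have hof : PySem.Dict.ofList [('A', (0:Int)), ('C', 1), ('G', 2), ('T', 3)]
      = PySem.Dict.mk [('A', (0:Int)), ('C', 1), ('G', 2), ('T', 3)] := by decide
  rw [hof]
  by_cases h1 : c = 'A' <;> by_cases h2 : c = 'C' <;> by_cases h3 : c = 'G' <;> by_cases h4 : c = 'T' <;>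
    simp_all [digC, PySem.Dict.get?]
  exact ⟨fun h => h1 h.symm, fun h => h2 h.symm, fun h => h3 h.symm, fun h => h4 h.symm⟩

lemma digC_bound {c : Char} {x : Int} (h : digC c = some x) : 0 ≤ x ∧ x < 4 := by
  unfold digC at h; split_ifs at h <;> simp_all <;> omega

lemma digC_inj {a b : Char} {x : Int} (ha : digC a = some x) (hb : digC b = some x) : a = b := by
  unfold digC at ha hb; split_ifs at ha hb <;> simp_all <;> omega

lemma enc?_eq_some {w : List Char} {k : Int} (h : enc? w = some k) :
    ∃ a b c d x y z u, w = [a, b, c, d] ∧ digC a = some x ∧ digC b = some y ∧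
      digC c = some z ∧ digC d = some u ∧ k = 64 * x + 16 * y + 4 * z + u := by
  unfold enc? at h
  split at h
  · next a b c d =>
    split at h
    · next x y z u hx hy hz hu =>
      exact ⟨a, b, c, d, x, y, z, u, rfl, hx, hy, hz, hu, by simp_all⟩
    · simp_all
  · simp_all

lemma enc?_inj {w w' : List Char} {k : Int} (h : enc? w = some k) (h' : enc? w' = some k) :
    w = w' := by
  obtain ⟨a, b, c, d, x, y, z, u, rfl, hx, hy, hz, hu, rfl⟩ := enc?_eq_some h
  obtain ⟨a', b', c', d', x', y', z', u', rfl, hx', hy', hz', hu', he⟩ := enc?_eq_some h'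
  obtain ⟨_, _⟩ := digC_bound hx; obtain ⟨_, _⟩ := digC_bound hy
  obtain ⟨_, _⟩ := digC_bound hz; obtain ⟨_, _⟩ := digC_bound hu
  obtain ⟨_, _⟩ := digC_bound hx'; obtain ⟨_, _⟩ := digC_bound hy'
  obtain ⟨_, _⟩ := digC_bound hz'; obtain ⟨_, _⟩ := digC_bound hu'
  have : x = x' ∧ y = y' ∧ z = z' ∧ u = u' := by omega
  obtain ⟨rfl, rfl, rfl, rfl⟩ := this
  rw [digC_inj hx hx', digC_inj hy hy', digC_inj hz hz', digC_inj hu hu']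

lemma enc?_none_of_bad {x : Char} {w : List Char} (hx : digC x = none) (hm : x ∈ w) :
    enc? w = none := by
  unfold enc?
  split
  · next a b c d =>
    simp only [List.mem_cons, List.not_mem_nil] at hm
    rcases hm with rfl | rfl | rfl | rfl | h <;> simp_all
  · rfl

lemma enc?_len {w : List Char} {k : Int} (h : enc? w = some k) : w.length = 4 := by
  obtain ⟨a, b, c, d, _, _, _, _, rfl, _⟩ := enc?_eq_some h; rfl

lemma vwc_short {l : List Char} (h : l.length ≤ 3) : vwc l = [] := by
  induction l with
  | nil => rfl
  | cons a rest ih =>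
    simp only [List.length_cons] at h
    have h1 : rest.length ≤ 3 := by omega
    rw [vwc, ih h1]
    have : wopt (a :: rest.take 3) = [] := by
      unfold wopt
      cases he : enc? (a :: rest.take 3) with
      | none => rfl
      | some k =>
        have := enc?_len he
        simp only [List.length_cons, List.length_take] at this
        omega
    simp [this]

lemma vwc_invalid {p : List Char} {c : Char} (hp : p.length ≤ 3) (hc : digC c = none)
    (cs : List Char) : vwc (p ++ c :: cs) = vwc cs := by
  have hw : ∀ (a : Char) (t : List Char), c ∈ a :: t.take 3 → wopt (a :: t.take 3) = [] := by
    intro a t hm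
    unfold wopt
    rw [enc?_none_of_bad hc hm]
  match p, hp with
  | [], _ =>
    rw [List.nil_append, vwc, hw c cs (by simp)]; rfl
  | [a], _ =>
    rw [List.cons_append, List.nil_append, vwc, hw a (c :: cs) (by simp), vwc,
      hw c cs (by simp)]; rfl
  | [a, b], _ =>
    rw [List.cons_append, List.cons_append, List.nil_append, vwc,
      hw a (b :: c :: cs) (by simp), vwc, hw b (c :: cs) (by simp), vwc, hw c cs (by simp)]; rfl
  | [a, b, d], _ =>
    rw [List.cons_append, List.cons_append, List.cons_append, List.nil_append, vwc,
      hw a (b :: d :: c :: cs) (by simp), vwc, hw b (d :: c :: cs) (by simp), vwc,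
      hw d (c :: cs) (by simp), vwc, hw c cs (by simp)]; rfl

lemma count_range_windows (cs : List Char) {w : List Char} {k : Int} (hw : enc? w = some k) :
    ((List.range (cs.length - 3)).map (fun i => (cs.drop i).take 4)).count w
      = (vwc cs).count k := by
  induction cs with
  | nil => simp [vwc]
  | cons a t ih =>
    by_cases h3 : t.length < 3
    · have h0 : (a :: t).length - 3 = 0 := by simp; omega
      rw [h0, vwc_short (l := a :: t) (by simp; omega)]
      simp
    · have h0 : (a :: t).length - 3 = (t.length - 3) + 1 := by simp; omega
      rw [h0, List.range_succ_eq_map]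
      simp only [List.map_cons, List.map_map]
      rw [List.count_cons]
      have hmap : (List.map ((fun i => List.take 4 (List.drop i (a :: t))) ∘ Nat.succ)
          (List.range (t.length - 3))) = (List.range (t.length - 3)).map (fun i => (t.drop i).take 4) := by
        apply List.map_congr_left; intro i _; rfl
      rw [hmap, ih, vwc]
      have hwin : List.take 4 (List.drop 0 (a :: t)) = a :: t.take 3 := by simp
      rw [List.count_append, hwin]
      have : (if (a :: t.take 3 == w) = true then 1 else 0) = (wopt (a :: t.take 3)).count k := by
        unfold wopt
        cases he : enc? (a :: t.take 3) with
        | none =>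
          have : ¬ (a :: t.take 3 = w) := by rintro rfl; rw [he] at hw; cases hw
          simp [this]
        | some k' =>
          by_cases hek : k' = k
          · subst hek
            have : a :: t.take 3 = w := enc?_inj he hw
            simp [this]
          · have : ¬ (a :: t.take 3 = w) := by rintro rfl; rw [he] at hw; simp_all
            simp [this, hek]
      omega

lemma encB_append (p : List Char) (c : Char) :
    encB (p ++ [c]) = 4 * encB p + (digC c).getD 0 := by
  simp [encB, List.foldl_append]

lemma encB3 {c1 c2 c3 : Char} {x1 x2 x3 : Int} (h1 : digC c1 = some x1)
    (h2 : digC c2 = some x2) (h3 : digC c3 = some x3) :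
    encB [c1, c2, c3] = 16 * x1 + 4 * x2 + x3 := by
  simp [encB, h1, h2, h3]; ring

lemma bmain (cs : List Char) : ∀ (p : List Char) (counts : List Int) (code run : Int),
    counts.length = 256 →
    (∀ c ∈ p, (digC c).isSome) →
    ((3 ≤ run ∧ p.length = 3) ∨ (run = (p.length : Int) ∧ p.length < 3)) →
    0 ≤ code → code % (4:Int) ^ p.length = encB p →
    (cs.foldl bstep (counts, code, run)).1.length = 256 ∧
    ∀ k : Nat, k < 256 →
      PySem.List.pyGetD (cs.foldl bstep (counts, code, run)).1 (k : Int) 0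
        = PySem.List.pyGetD counts (k : Int) 0 + ((vwc (p ++ cs)).count (k : Int) : Int) := by
  induction cs with
  | nil =>
    intro p counts code run hlen hval hrun hc0 hcode
    have hp3 : p.length ≤ 3 := by rcases hrun with ⟨_, h⟩ | ⟨_, h⟩ <;> omega
    simp only [List.foldl_nil, List.append_nil]
    refine ⟨hlen, fun k hk => ?_⟩
    rw [vwc_short hp3]
    simp
  | cons ch cs' ih =>
    intro p counts code run hlen hval hrun hc0 hcode
    have hp3 : p.length ≤ 3 := by rcases hrun with ⟨_, h⟩ | ⟨_, h⟩ <;> omega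
    rw [List.foldl_cons]
    have hstep : bstep (counts, code, run) ch =
        match digC ch with
        | none => (counts, code, 0)
        | some v =>
          let code' := PySem.Int.mod (code * 4 + v) 256
          let run' := run + 1
          if 4 ≤ run' then
            (PySem.List.pySetD counts code' (PySem.List.pyGetD counts code' 0 + 1), code', run')
          else (counts, code', run') := by
      unfold bstep; rw [mget ch]
    rw [hstep]
    cases hd : digC ch with
    | none =>
      simp only
      have := ih [] counts code 0 hlen (by simp) (by simp) hc0 (by simp [encB])
      rw [List.nil_append] at this
      rw [vwc_invalid hp3 hd cs']
      exact this
    | some v =>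
      simp only
      obtain ⟨hv0, hv4⟩ := digC_bound hd
      have hE : PySem.Int.mod (code * 4 + v) 256 = (code * 4 + v) % 256 := by
        simp [PySem.Int.mod, Int.fmod_eq_emod]
      set E : Int := PySem.Int.mod (code * 4 + v) 256 with hEdef
      have hE0 : 0 ≤ E := by rw [hE]; omega
      have hE256 : E < 256 := by rw [hE]; omega
      rcases hrun with ⟨hr3, hl3⟩ | ⟨hre, hllt⟩
      · -- the window fires
        have hif : (4 ≤ run + 1) = True := by simp; omega
        simp only [hif, if_true]
        match p, hl3 with
        | [c1, c2, c3], _ =>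
          have h1 : (digC c1).isSome := hval c1 (by simp)
          have h2 : (digC c2).isSome := hval c2 (by simp)
          have h3 : (digC c3).isSome := hval c3 (by simp)
          obtain ⟨x1, hd1⟩ := Option.isSome_iff_exists.mp h1
          obtain ⟨x2, hd2⟩ := Option.isSome_iff_exists.mp h2
          obtain ⟨x3, hd3⟩ := Option.isSome_iff_exists.mp h3
          obtain ⟨hx10, hx14⟩ := digC_bound hd1
          obtain ⟨hx20, hx24⟩ := digC_bound hd2
          obtain ⟨hx30, hx34⟩ := digC_bound hd3
          rw [encB3 hd1 hd2 hd3] at hcode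
          simp only [List.length_cons, List.length_nil] at hcode
          have hcode' : code % 64 = 16 * x1 + 4 * x2 + x3 := by
            have : ((4:Int) ^ (2 + 1)) = 64 := by norm_num
            rw [this] at hcode; exact hcode
          have hEval : E = 64 * x1 + 16 * x2 + 4 * x3 + v := by rw [hE]; omega
          have hEnat : E = ((E.toNat : Nat) : Int) := by omega
          have hEnat256 : E.toNat < 256 := by omega
          have hlen' : (PySem.List.pySetD counts E (PySem.List.pyGetD counts E 0 + 1)).length = 256 := by
            rw [PySem.List.length_pySetD]; exact hlen
          have hih := ih [c2, c3, ch]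
            (PySem.List.pySetD counts E (PySem.List.pyGetD counts E 0 + 1)) E (run + 1)
            hlen'
            (by intro c hc; simp at hc; rcases hc with rfl | rfl | rfl <;> simp [hd2, hd3, hd])
            (Or.inl ⟨by omega, rfl⟩)
            hE0
            (by rw [encB3 hd2 hd3 hd]
                simp only [List.length_cons, List.length_nil]
                have : ((4:Int) ^ (2 + 1)) = 64 := by norm_num
                rw [this]
                omega)
          refine ⟨hih.1, fun k hk => ?_⟩
          rw [hih.2 k hk]
          have hvwc : vwc ([c1, c2, c3] ++ ch :: cs') = wopt [c1, c2, c3, ch] ++ vwc ([c2, c3, ch] ++ cs') := by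
            simp [vwc]
          rw [hvwc]
          have hwopt : wopt [c1, c2, c3, ch] = [E] := by
            simp [wopt, enc?, hd1, hd2, hd3, hd, hEval]
          rw [hwopt, List.count_append]
          have hget : PySem.List.pyGetD (PySem.List.pySetD counts E (PySem.List.pyGetD counts E 0 + 1)) (k : Int) 0
              = if k = E.toNat then PySem.List.pyGetD counts E 0 + 1 else PySem.List.pyGetD counts (k : Int) 0 := by
            rw [hEnat]
            exact PySem.List.pyGetD_pySetD_natCast counts E.toNat k _ 0 (by omega)
          rw [hget]
          by_cases hke : k = E.toNat
          · subst hke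
            have : List.count ((E.toNat : Nat) : Int) [E] = 1 := by
              simp [← hEnat]
            rw [this, ← hEnat]
            push_cast
            omega
          · have hne : ((k : Nat) : Int) ≠ E := by omega
            have : List.count ((k : Nat) : Int) [E] = 0 := by
              simp [List.count_singleton]
              exact fun h => hne h.symm
            rw [this]
            simp [hke]
      · -- the window does not fire yet
        have hif : ¬ (4 ≤ run + 1) := by omega
        simp only [if_neg hif]
        have hih := ih (p ++ [ch]) counts E (run + 1)
          hlen
          (by intro c hc; simp at hc; rcases hc with hc | rfl
              · exact hval c hc
              · simp [hd])
          (by by_cases h23 : p.length = 2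
              · left
                constructor
                · omega
                · simp [h23]
              · right
                constructor
                · simp; omega
                · simp; omega)
          hE0
          (by rw [encB_append, hd]
              simp only [List.length_append, List.length_cons, List.length_nil, Option.getD_some]
              have hL : p.length = 0 ∨ p.length = 1 ∨ p.length = 2 := by omega
              rcases hL with hL | hL | hL <;>
                rw [hL] <;> simp only [hL] at hcode <;> norm_num at hcode ⊢ <;> rw [hE] <;> omega)
        rw [List.append_cons]
        exact hih

set_option maxRecDepth 20000 in
lemma tetras_eq :
    (["A", "C", "G", "T"] : List String).flatMap (fun a =>
      (["A", "C", "G", "T"] : List String).flatMap (fun b =>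
        (["A", "C", "G", "T"] : List String).flatMap (fun c =>
          (["A", "C", "G", "T"] : List String).map (fun d => PySem.Str.join "" [a, b, c, d]))))
      = (List.range 256).map tetraStr := by decide

set_option maxRecDepth 20000 in
lemma tetra_enc : ∀ k : Nat, k < 256 → enc? (tetraChars k) = some (k : Int) := by decide

lemma tetraStr_toList (k : Nat) : (tetraStr k).toList = tetraChars k := by
  simp [tetraStr]

lemma words_toList (seq : String) :
    ((PySem.List.pyRange 0 (PySem.Str.len seq - 3) 1).map
        (fun i => PySem.Str.slice seq (some i) (some (i + 4)))).map String.toList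
      = (List.range (seq.toList.length - 3)).map (fun i => ((seq.toList.drop i).take 4)) := by
  rw [PySem.Str.len_eq]
  by_cases h3 : seq.toList.length < 3
  · have h0 : seq.toList.length - 3 = 0 := by omega
    have hlen : seq.toList.length = seq.length := by simp
    have hnil : PySem.List.pyRange 0 ((seq.toList.length : Int) - 3) 1 = [] := by
      simp [PySem.List.pyRange]
      omega
    rw [hnil, h0]; simp
  · have hcast : (seq.toList.length : Int) - 3 = ((seq.toList.length - 3 : Nat) : Int) := by omega
    rw [hcast, PySem.List.pyRange_zero_natCast, List.map_map, List.map_map]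
    apply List.map_congr_left
    intro i _
    simp only [Function.comp_apply]
    rw [PySem.Str.toList_slice]
    have h4 : ((i:Int) + 4) = ((i:Int) + ((4:Nat):Int)) := by norm_num
    rw [h4]
    exact PySem.List.slice_natCast_add seq.toList i 4

lemma a_elem (seq : String) (k : Nat) (hk : k < 256) :
    ((PySem.List.pyRange 0 (PySem.Str.len seq - 3) 1).foldl
      (fun d i =>
        let word := PySem.Str.slice seq (some i) (some (i + 4))
        d.insert word (d.getD word 0 + 1)) PySem.Dict.empty).getD (tetraStr k) 0
    = ((vwc seq.toList).count (k : Int) : Int) := by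
  rw [show (fun (d : PySem.Dict String Int) (i : Int) =>
        let word := PySem.Str.slice seq (some i) (some (i + 4))
        d.insert word (d.getD word 0 + 1))
      = (fun (d : PySem.Dict String Int) (i : Int) =>
        d.insert (PySem.Str.slice seq (some i) (some (i + 4)))
          (d.getD (PySem.Str.slice seq (some i) (some (i + 4))) 0 + 1)) from rfl]
  rw [← List.foldl_map (f := fun i => PySem.Str.slice seq (some i) (some (i + 4)))
      (g := fun (d : PySem.Dict String Int) w => d.insert w (d.getD w 0 + 1))]
  rw [PySem.Dict.getD_foldl_insert_add_one, PySem.Dict.getD_empty, zero_add]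
  congr 1
  have hcnt := List.count_map_of_injective (x := tetraStr k)
      ((PySem.List.pyRange 0 (PySem.Str.len seq - 3) 1).map
        (fun i => PySem.Str.slice seq (some i) (some (i + 4))))
      String.toList (fun _ _ h => String.toList_injective h)
  rw [← hcnt, words_toList, tetraStr_toList]
  exact count_range_windows seq.toList (tetra_enc k hk)

lemma a_assembly (seq : String) :
    tetra_substr seq =
      PySem.Str.join "\t" ((List.range 256).map
        (fun (k : Nat) => PySem.Int.toStr ((vwc seq.toList).count ((k : Int))))) := by
  unfold tetra_substr
  simp only
  rw [tetras_eq, List.map_map]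
  refine congrArg (PySem.Str.join "\t") ?_
  apply List.map_congr_left
  intro k hk
  simp only [Function.comp_apply]
  rw [a_elem seq k (List.mem_range.mp hk)]

set_option maxRecDepth 40000 in
lemma b_assembly (seq : String) :
    tetra_substr_alt seq =
      PySem.Str.join "\t" ((List.range 256).map
        (fun (k : Nat) => PySem.Int.toStr ((vwc seq.toList).count ((k : Int))))) := by
  rw [balt_eq]
  obtain ⟨hlen, hget⟩ := bmain seq.toList [] (List.replicate 256 0) 0 0
    (by simp) (by simp) (by simp) le_rfl (by simp [encB])
  refine congrArg (PySem.Str.join "\t") ?_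
  have hfin : (seq.toList.foldl bstep (List.replicate 256 0, 0, 0)).1
      = (List.range 256).map (fun (k : Nat) => (((vwc seq.toList).count (k : Int)) : Int)) := by
    apply List.ext_getElem
    · rw [hlen, List.length_map, List.length_range]
    intro i h1 h2
    have hi : i < 256 := by rw [hlen] at h1; exact h1
    have lhs : (seq.toList.foldl bstep (List.replicate 256 0, 0, 0)).1[i]
        = PySem.List.pyGetD (seq.toList.foldl bstep (List.replicate 256 0, 0, 0)).1 ((i : Nat) : Int) 0 := by
      rw [PySem.List.pyGetD_natCast]
      exact (List.getD_eq_getElem _ _ h1).symm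
    rw [lhs, hget i hi, List.nil_append]
    have h0 : PySem.List.pyGetD (List.replicate 256 (0:Int)) ((i : Nat) : Int) 0 = 0 := by
      rw [PySem.List.pyGetD_natCast]
      rw [List.getD_eq_getElem _ _ (by rw [List.length_replicate]; exact hi)]
      apply List.getElem_replicate
    rw [h0, zero_add]
    rw [List.getElem_map, List.getElem_range]
  rw [hfin, List.map_map]
  rfl

-- ===== VERDICT (by name: the statement is the Claim_ definition above) =====
theorem tetra_substr_spec : Claim_equal_tetra_substr := by
  intro seq _
  unfold Spec_tetra_substr
  rw [a_assembly, b_assembly]
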